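-- pv_equiv track=rewrite | github.com/misaka-10032/leetcode | coding/01424-diagonal-traverse-ii/solution.py | findDiagonalOrder
-- ===== SOURCE A (Python) =====
-- from typing import List
--
-- def findDiagonalOrder(nums: List[List[int]]) -> List[int]:
--     m = len(nums)
--     n = 0
--     for row in nums:
--         n = max(n, len(row))
--
--     diag_cnt = m + n - 1
--     diags = [[] for _ in range(diag_cnt)]
--     for i, row in enumerate(nums):
--         for j, val in enumerate(row):
--             diag_idx = i + j
--             diags[diag_idx].append(val)
--
--     result = []
--     for diag_idx in range(diag_cnt):
--         result.extend(reversed(diags[diag_idx]))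
--     return result
-- ===== SOURCE B (Python) =====
-- from typing import List
--
-- def findDiagonalOrder(nums: List[List[int]]) -> List[int]:
--     flat = [(i + j, -i, v) for i, row in enumerate(nums) for j, v in enumerate(row)]
--     flat.sort(key=lambda t: (t[0], t[1]))
--     return [v for _, _, v in flat]
-- ===== Notes on version B (the rewrite author's own statement) =====
-- stated objective: alternative
-- what changed: Replaces A's bucket-per-diagonal grouping followed by per-bucket reversal with a single flat list of (diagonal, -row, value) triples sorted by (diagonal, -row).
import Mathlib
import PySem

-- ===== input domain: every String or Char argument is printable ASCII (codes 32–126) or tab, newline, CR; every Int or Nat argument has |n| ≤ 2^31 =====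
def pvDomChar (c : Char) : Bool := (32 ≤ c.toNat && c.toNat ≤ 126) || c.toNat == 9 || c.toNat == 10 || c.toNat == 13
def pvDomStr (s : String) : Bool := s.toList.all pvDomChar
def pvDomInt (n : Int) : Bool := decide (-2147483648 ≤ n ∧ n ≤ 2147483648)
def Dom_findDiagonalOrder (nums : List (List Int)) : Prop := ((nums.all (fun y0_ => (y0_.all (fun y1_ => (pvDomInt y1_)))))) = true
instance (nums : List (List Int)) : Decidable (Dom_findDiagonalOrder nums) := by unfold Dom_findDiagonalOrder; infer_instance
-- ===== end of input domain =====

-- B replaces A's bucket-per-diagonal grouping + per-bucket reversal with one flat list of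
-- (diagonal, -row, value) triples sorted by the key (diagonal, -row) (alternative decomposition, not faster).

-- ===== PORT A =====
def findDiagonalOrder (nums : List (List Int)) : List Int :=
  let m : Int := nums.length
  let n : Int := nums.foldl (fun acc row => max acc ((row.length : Int))) 0
  let diagCnt : Int := m + n - 1
  let diags0 : List (List Int) := (PySem.List.pyRange 0 diagCnt 1).map (fun _ => [])
  let diags : List (List Int) := (PySem.List.enumerate nums).foldl (fun dgs p =>
      (PySem.List.enumerate p.2).foldl (fun dgs q =>
          PySem.List.pySetD dgs (p.1 + q.1) (PySem.List.pyGetD dgs (p.1 + q.1) [] ++ [q.2])) dgs) diags0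
  (PySem.List.pyRange 0 diagCnt 1).foldl (fun result d =>
      result ++ (PySem.List.pyGetD diags d []).reverse) []

-- ===== PORT B =====
def findDiagonalOrder_alt (nums : List (List Int)) : List Int :=
  let flat : List (Int × Int × Int) :=
    (PySem.List.enumerate nums).flatMap (fun p =>
      (PySem.List.enumerate p.2).map (fun q => (p.1 + q.1, -p.1, q.2)))
  (PySem.List.sorted2 flat (fun t => t.1) (fun t => t.2.1)).map (fun t => t.2.2)

-- ===== PRECONDITION & SPEC =====
def Spec_findDiagonalOrder (nums : List (List Int)) (out : List Int) : Prop := out = findDiagonalOrder_alt nums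
instance (nums : List (List Int)) (out : List Int) : Decidable (Spec_findDiagonalOrder nums out) := by unfold Spec_findDiagonalOrder; infer_instance

-- ===== CLAIM (what is proved, stated in full; the proofs are below) =====
def Claim_equal_findDiagonalOrder : Prop := ∀ (nums : List (List Int)), Dom_findDiagonalOrder nums → Spec_findDiagonalOrder nums (findDiagonalOrder nums)

-- ===== LEMMAS AND PROOFS =====

-- the flat triple list (d, -i, v) built by B
def pvFlat (nums : List (List Int)) : List (Int × Int × Int) :=
  (PySem.List.enumerate nums).flatMap (fun p =>
    (PySem.List.enumerate p.2).map (fun q => (p.1 + q.1, -p.1, q.2)))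

-- n = max row length, and the diagonal count m + n - 1
def pvN (nums : List (List Int)) : Int := nums.foldl (fun acc row => max acc ((row.length : Int))) 0
def pvCnt (nums : List (List Int)) : Int := nums.length + pvN nums - 1

-- a single Int key realising the lexicographic order of (d, -i) on the triples of pvFlat
def pvKey (m : Int) (t : Int × Int × Int) : Int := t.1 * m + t.2.1

-- A's per-element bucket update
def pvUpd (dgs : List (List Int)) (t : Int × Int × Int) : List (List Int) :=
  PySem.List.pySetD dgs t.1 (PySem.List.pyGetD dgs t.1 [] ++ [t.2.2])

-- canonical result order: diagonals ascending, each diagonal with row index descending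
def pvTarget (nums : List (List Int)) : List (Int × Int × Int) :=
  (PySem.List.pyRange 0 (pvCnt nums) 1).flatMap
    (fun d => ((pvFlat nums).filter (fun t => t.1 == d)).reverse)

lemma pvFlat_mem_bounds (nums : List (List Int)) (t : Int × Int × Int)
    (ht : t ∈ pvFlat nums) :
    -(nums.length : Int) < t.2.1 ∧ t.2.1 ≤ 0 ∧ 0 ≤ t.1 ∧ t.1 < pvCnt nums := by
  rcases List.mem_flatMap.1 ht with ⟨p, hp, htp⟩
  rcases List.mem_map.1 htp with ⟨q, hq, rfl⟩
  rcases (PySem.List.mem_enumerate_iff _ _ _).1 hp with ⟨k, hk, rfl⟩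
  rcases (PySem.List.mem_enumerate_iff _ _ _).1 hq with ⟨k', hk', rfl⟩
  have hrow : ((nums[k].length : Int)) ≤ pvN nums :=
    (PySem.List.le_foldl_max_int nums (fun row => (row.length : Int)) 0).2 _ (by simp)
  simp only [pvCnt]
  have h1 : (k : Int) < (nums.length : Int) := by exact_mod_cast hk
  have h2 : (k' : Int) < ((nums[k].length : Int)) := by exact_mod_cast hk'
  exact ⟨by omega, by omega, by omega, by omega⟩

lemma pv_cmp_eq (m : Int) (a b : Int × Int × Int)
    (ha1 : -m < a.2.1) (ha2 : a.2.1 ≤ 0) (hb1 : -m < b.2.1) (hb2 : b.2.1 ≤ 0) :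
    (decide (a.1 < b.1) || (!decide (b.1 < a.1) && decide (a.2.1 < b.2.1)))
      = decide (pvKey m a < pvKey m b) := by
  have hm : 0 < m := by omega
  rcases lt_trichotomy a.1 b.1 with h | h | h
  · have hk : pvKey m a < pvKey m b := by
      have hmul : (a.1 + 1) * m ≤ b.1 * m :=
        mul_le_mul_of_nonneg_right (by omega) (le_of_lt hm)
      unfold pvKey; nlinarith
    simp [h, hk]
  · simp [pvKey, h]
  · have h1 : ¬ a.1 < b.1 := by omega
    have hk : ¬ pvKey m a < pvKey m b := by
      have hmul : (b.1 + 1) * m ≤ a.1 * m :=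
        mul_le_mul_of_nonneg_right (by omega) (le_of_lt hm)
      unfold pvKey; nlinarith
    simp [h, h1, hk]

lemma pv_insertBy_congr {α : Type} (f g : α → α → Bool) (x : α) (acc : List α)
    (h : ∀ b ∈ acc, f x b = g x b) :
    PySem.List.insertBy f x acc = PySem.List.insertBy g x acc := by
  induction acc with
  | nil => rfl
  | cons y ys ih =>
      rw [PySem.List.insertBy.eq_2, PySem.List.insertBy.eq_2,
          h y (by simp), ih (fun b hb => h b (by simp [hb]))]

lemma pv_foldl_insertBy_congr {α : Type} (f g : α → α → Bool) (xs acc : List α)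
    (h : ∀ a ∈ acc ++ xs, ∀ b ∈ acc ++ xs, f a b = g a b) :
    xs.foldl (fun acc x => PySem.List.insertBy f x acc) acc
      = xs.foldl (fun acc x => PySem.List.insertBy g x acc) acc := by
  induction xs generalizing acc with
  | nil => rfl
  | cons x xs ih =>
      simp only [List.foldl_cons]
      rw [pv_insertBy_congr f g x acc (fun b hb => h x (by simp) b (by simp [hb]))]
      exact ih (PySem.List.insertBy g x acc) (fun a ha b hb => by
        have ha' : a ∈ acc ++ x :: xs := by
          rcases List.mem_append.1 ha with h1 | h1
          · rcases (PySem.List.mem_insertBy _ _ _ _).1 h1 with h2 | h2 <;> simp [h2]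
          · simp [h1]
        have hb' : b ∈ acc ++ x :: xs := by
          rcases List.mem_append.1 hb with h1 | h1
          · rcases (PySem.List.mem_insertBy _ _ _ _).1 h1 with h2 | h2 <;> simp [h2]
          · simp [h1]
        exact h a ha' b hb')

lemma pv_sorted2_eq_sorted (nums : List (List Int)) :
    PySem.List.sorted2 (pvFlat nums) (fun t => t.1) (fun t => t.2.1)
      = PySem.List.sorted (pvFlat nums) (pvKey (nums.length : Int)) := by
  rw [PySem.List.sorted_eq_foldl_insertBy]
  show (pvFlat nums).foldl (fun acc x => PySem.List.insertBy
      (fun a b => decide (a.1 < b.1) || (!decide (b.1 < a.1) && decide (a.2.1 < b.2.1))) x acc) []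
    = _
  apply pv_foldl_insertBy_congr
  intro a ha b hb
  simp only [List.nil_append] at ha hb
  exact pv_cmp_eq _ a b (pvFlat_mem_bounds nums a ha).1 (pvFlat_mem_bounds nums a ha).2.1
    (pvFlat_mem_bounds nums b hb).1 (pvFlat_mem_bounds nums b hb).2.1

lemma pv_flatMap_filter_perm {α : Type} (f : α → Int) (ds : List Int) (l : List α)
    (hnd : ds.Nodup) (hcov : ∀ x ∈ l, f x ∈ ds) :
    (ds.flatMap (fun d => l.filter (fun x => f x == d))).Perm l := by
  induction ds generalizing l with
  | nil =>
      have : l = [] := by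
        cases l with
        | nil => rfl
        | cons a t => exact absurd (hcov a (by simp)) (by simp)
      simp [this]
  | cons d ds ih =>
      have hnd' := (List.nodup_cons.1 hnd).2
      have hdnot := (List.nodup_cons.1 hnd).1
      have hsame : ds.flatMap (fun d' => l.filter (fun x => f x == d'))
          = ds.flatMap (fun d' => (l.filter (fun x => !(f x == d))).filter (fun x => f x == d')) := by
        apply List.flatMap_congr
        intro d' hd'
        rw [List.filter_filter]
        apply List.filter_congr
        intro x _
        have hdd : d' ≠ d := fun h => hdnot (h ▸ hd')
        by_cases hx : f x = d'
        · simp [hx, hdd]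
        · simp [hx]
      have hcov' : ∀ x ∈ l.filter (fun x => !(f x == d)), f x ∈ ds := by
        intro x hx
        rcases List.mem_filter.1 hx with ⟨hxl, hxd⟩
        have := hcov x hxl
        simp only [List.mem_cons] at this
        rcases this with h | h
        · simp [h] at hxd
        · exact h
      have ihh := ih (l.filter (fun x => !(f x == d))) hnd' hcov'
      have h1 : ((d :: ds).flatMap (fun d' => l.filter (fun x => f x == d')))
          = l.filter (fun x => f x == d) ++ ds.flatMap (fun d' => l.filter (fun x => f x == d')) := by
        simp
      rw [h1, hsame]
      exact (List.Perm.append (List.Perm.refl _) ihh).trans (List.filter_append_perm _ l)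

lemma pvFlat_pairwise (nums : List (List Int)) :
    (pvFlat nums).Pairwise (fun a b => b.2.1 < a.2.1 ∨ (a.2.1 = b.2.1 ∧ a.1 < b.1)) := by
  unfold pvFlat
  rw [List.pairwise_flatMap]
  constructor
  · intro p hp
    rw [List.pairwise_map]
    apply List.Pairwise.imp ?_ (PySem.List.pairwise_lt_enumerate p.2 0)
    intro q q' hqq'
    right
    exact ⟨rfl, by omega⟩
  · apply List.Pairwise.imp ?_ (PySem.List.pairwise_lt_enumerate nums 0)
    intro p p' hpp' x hx y hy
    left
    rcases List.mem_map.1 hx with ⟨q, _, rfl⟩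
    rcases List.mem_map.1 hy with ⟨q', _, rfl⟩
    simp only []
    omega

lemma pvTarget_perm (nums : List (List Int)) : (pvTarget nums).Perm (pvFlat nums) := by
  unfold pvTarget
  have h1 : ((PySem.List.pyRange 0 (pvCnt nums) 1).flatMap
        (fun d => ((pvFlat nums).filter (fun t => t.1 == d)).reverse)).Perm
      ((PySem.List.pyRange 0 (pvCnt nums) 1).flatMap
        (fun d => (pvFlat nums).filter (fun t => t.1 == d))) :=
    List.Perm.flatMap (List.Perm.refl _) (fun d _ => List.reverse_perm _)
  refine h1.trans (pv_flatMap_filter_perm (fun (t : Int × Int × Int) => t.1) _ _ (PySem.List.nodup_pyRange_one 0 _) ?_)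
  intro t ht
  have hb := pvFlat_mem_bounds nums t ht
  exact PySem.List.mem_pyRange_one.2 ⟨hb.2.2.1, hb.2.2.2⟩

lemma pvTarget_pairwise (nums : List (List Int)) :
    (pvTarget nums).Pairwise (fun a b => pvKey (nums.length : Int) a < pvKey (nums.length : Int) b) := by
  unfold pvTarget
  rw [List.pairwise_flatMap]
  constructor
  · intro d hd
    rw [List.pairwise_reverse]
    have hpw := (pvFlat_pairwise nums).filter (fun t => t.1 == d)
    apply List.Pairwise.imp_of_mem ?_ hpw
    intro a b ha hb hr
    have haf : a ∈ pvFlat nums := (List.mem_filter.1 ha).1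
    have hbf : b ∈ pvFlat nums := (List.mem_filter.1 hb).1
    have had : a.1 = d := by simpa using (List.mem_filter.1 ha).2
    have hbd : b.1 = d := by simpa using (List.mem_filter.1 hb).2
    have hmm : a.1 * (nums.length : Int) = b.1 * (nums.length : Int) := by rw [had, hbd]
    rcases hr with h | ⟨h1, h2⟩
    · unfold pvKey; linarith
    · exact absurd h2 (by omega)
  · apply List.Pairwise.imp ?_ (PySem.List.pairwise_lt_pyRange_one 0 (pvCnt nums))
    intro d d' hdd' x hx y hy
    have hxf : x ∈ pvFlat nums := (List.mem_filter.1 (List.mem_reverse.1 hx)).1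
    have hyf : y ∈ pvFlat nums := (List.mem_filter.1 (List.mem_reverse.1 hy)).1
    have hxd : x.1 = d := by simpa using (List.mem_filter.1 (List.mem_reverse.1 hx)).2
    have hyd : y.1 = d' := by simpa using (List.mem_filter.1 (List.mem_reverse.1 hy)).2
    have hbx := pvFlat_mem_bounds nums x hxf
    have hby := pvFlat_mem_bounds nums y hyf
    have hm : (0:Int) < (nums.length : Int) := by omega
    have hmul : (x.1 + 1) * (nums.length : Int) ≤ y.1 * (nums.length : Int) :=
      mul_le_mul_of_nonneg_right (by omega) (le_of_lt hm)
    unfold pvKey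
    nlinarith

lemma pv_bucket_invariant (ts : List (Int × Int × Int)) (dgs : List (List Int)) (d : Int)
    (hts : ∀ t ∈ ts, 0 ≤ t.1 ∧ t.1 < (dgs.length : Int))
    (hd0 : 0 ≤ d) (hd1 : d < (dgs.length : Int)) :
    PySem.List.pyGetD (ts.foldl pvUpd dgs) d []
      = PySem.List.pyGetD dgs d [] ++ (ts.filter (fun t => t.1 == d)).map (fun t => t.2.2) := by
  induction ts generalizing dgs with
  | nil => simp
  | cons t ts ih =>
      have htb := hts t (by simp)
      have hlen : (pvUpd dgs t).length = dgs.length := PySem.List.length_pySetD _ _ _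
      have hts' : ∀ u ∈ ts, 0 ≤ u.1 ∧ u.1 < ((pvUpd dgs t).length : Int) := by
        intro u hu; rw [hlen]; exact hts u (by simp [hu])
      rw [List.foldl_cons, ih (pvUpd dgs t) hts' (by rw [hlen]; exact hd1)]
      have et : ((t.1.toNat : Nat) : Int) = t.1 := Int.toNat_of_nonneg htb.1
      have ed : ((d.toNat : Nat) : Int) = d := Int.toNat_of_nonneg hd0
      have hset : PySem.List.pyGetD (pvUpd dgs t) d []
          = if d.toNat = t.1.toNat then PySem.List.pyGetD dgs t.1 [] ++ [t.2.2]
            else PySem.List.pyGetD dgs d [] := by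
        unfold pvUpd
        rw [← et, ← ed]
        rw [PySem.List.pyGetD_pySetD_natCast dgs t.1.toNat d.toNat _ [] (by omega)]
        simp [et, ed]
      by_cases hdt : t.1 = d
      · have : d.toNat = t.1.toNat := by omega
        rw [hset, if_pos this]
        have : (t.1 == d) = true := by simp [hdt]
        simp [hdt, List.append_assoc]
      · have hne : ¬ d.toNat = t.1.toNat := by omega
        rw [hset, if_neg hne]
        have : (t.1 == d) = false := by simp [hdt]
        simp [this]

lemma pv_diags0_get (cnt d : Int) :
    PySem.List.pyGetD ((PySem.List.pyRange 0 cnt 1).map (fun _ => ([] : List Int))) d [] = [] := by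
  have := PySem.List.pyGetD_map (fun _ => ([] : List Int)) (PySem.List.pyRange 0 cnt 1) d 0
  simpa using this

lemma pvB_eq (nums : List (List Int)) :
    findDiagonalOrder_alt nums = (pvTarget nums).map (fun t => t.2.2) := by
  show (PySem.List.sorted2 (pvFlat nums) (fun t => t.1) (fun t => t.2.1)).map (fun t => t.2.2) = _
  rw [pv_sorted2_eq_sorted,
    PySem.List.sorted_eq_of_perm_of_pairwise_lt _ _ _ (pvTarget_perm nums) (pvTarget_pairwise nums)]

lemma pvA_eq (nums : List (List Int)) :
    findDiagonalOrder nums = (pvTarget nums).map (fun t => t.2.2) := by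
  show (PySem.List.pyRange 0 (pvCnt nums) 1).foldl (fun result d =>
      result ++ (PySem.List.pyGetD ((PySem.List.enumerate nums).foldl (fun dgs p =>
        (PySem.List.enumerate p.2).foldl (fun dgs q =>
          PySem.List.pySetD dgs (p.1 + q.1) (PySem.List.pyGetD dgs (p.1 + q.1) [] ++ [q.2])) dgs)
        ((PySem.List.pyRange 0 (pvCnt nums) 1).map (fun _ => []))) d []).reverse) [] = _
  have hdiags : (PySem.List.enumerate nums).foldl (fun dgs p =>
        (PySem.List.enumerate p.2).foldl (fun dgs q =>
          PySem.List.pySetD dgs (p.1 + q.1) (PySem.List.pyGetD dgs (p.1 + q.1) [] ++ [q.2])) dgs)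
        ((PySem.List.pyRange 0 (pvCnt nums) 1).map (fun _ => []))
      = (pvFlat nums).foldl pvUpd ((PySem.List.pyRange 0 (pvCnt nums) 1).map (fun _ => [])) := by
    rw [pvFlat, List.foldl_flatMap]
    congr 1
    funext dgs p
    rw [List.foldl_map]
    rfl
  rw [hdiags, PySem.List.foldl_append_eq_flatMap, pvTarget, List.map_flatMap]
  simp only [List.nil_append]
  apply List.flatMap_congr
  intro d hd
  have hdm := PySem.List.mem_pyRange_one.1 hd
  have hlen : (((PySem.List.pyRange 0 (pvCnt nums) 1).map (fun _ => ([] : List Int))).length : Int)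
      = pvCnt nums := by
    simp [PySem.List.length_pyRange_one]
    omega
  rw [pv_bucket_invariant (pvFlat nums) _ d
    (fun t ht => by rw [hlen]; exact ⟨(pvFlat_mem_bounds nums t ht).2.2.1, (pvFlat_mem_bounds nums t ht).2.2.2⟩)
    hdm.1 (by rw [hlen]; exact hdm.2)]
  rw [pv_diags0_get]
  simp [List.map_reverse]

-- ===== VERDICT (by name: the statement is the Claim_ definition above) =====
theorem findDiagonalOrder_spec : Claim_equal_findDiagonalOrder := by
  intro nums _
  unfold Spec_findDiagonalOrder
  rw [pvA_eq, pvB_eq]
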